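-- pv_equiv track=rewrite | github.com/ultramind21/Neural-Arithmetic-Diagnostics | final_audit/code_audit/verify_phase6b_training_setup.py | find_keyword_contexts
-- ===== SOURCE A (Python) =====
-- def find_keyword_contexts(lines, keywords, max_hits=4):
--     results = {}
--     for kw in keywords:
--         hits = []
--         for i, line in enumerate(lines, 1):
--             if kw.lower() in line.lower():
--                 hits.append((i, line.rstrip("\n")))
--             if len(hits) >= max_hits:
--                 break
--         results[kw] = hits
--     return results
-- ===== SOURCE B (Python) =====
-- def find_keyword_contexts(lines, keywords, max_hits=4):
--     # One pass over the lines: each line is lowercased/rstripped once and fed to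
--     # every still-active keyword bucket; a bucket goes inactive once it has
--     # max_hits hits (checked after each line, like A's break).
--     entries = []  # [keyword, lowered pattern, hits, active]
--     seen = set()
--     for kw in keywords:
--         if kw not in seen:
--             seen.add(kw)
--             entries.append([kw, kw.lower(), [], True])
--     for i, line in enumerate(lines, 1):
--         low = line.lower()
--         text = line.rstrip("\n")
--         for e in entries:
--             if e[3]:
--                 if e[1] in low:
--                     e[2].append((i, text))
--                 if len(e[2]) >= max_hits:
--                     e[3] = False
--     return {e[0]: e[2] for e in entries}
-- ===== Notes on version B (the rewrite author's own statement) =====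
-- stated objective: faster
-- what changed: Outer loop over keywords with a fresh scan of all lines per keyword is replaced by a single pass over the lines that lowercases/rstrips each line once and feeds it to per-keyword buckets, deactivating a bucket when it reaches max_hits.
import Mathlib
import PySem

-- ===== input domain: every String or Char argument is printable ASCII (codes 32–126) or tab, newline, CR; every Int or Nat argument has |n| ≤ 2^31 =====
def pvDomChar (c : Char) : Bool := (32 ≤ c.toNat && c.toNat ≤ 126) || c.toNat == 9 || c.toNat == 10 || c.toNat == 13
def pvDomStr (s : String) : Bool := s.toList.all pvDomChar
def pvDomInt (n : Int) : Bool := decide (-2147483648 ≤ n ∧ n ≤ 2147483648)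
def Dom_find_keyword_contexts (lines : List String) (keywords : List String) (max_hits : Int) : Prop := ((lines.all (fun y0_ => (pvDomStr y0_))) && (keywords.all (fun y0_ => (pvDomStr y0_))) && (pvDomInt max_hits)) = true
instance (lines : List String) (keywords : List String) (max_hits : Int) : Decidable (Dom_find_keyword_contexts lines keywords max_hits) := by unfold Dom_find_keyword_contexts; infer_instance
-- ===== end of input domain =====

-- B replaces A's per-keyword rescans of all lines by ONE pass over the lines feeding
-- per-keyword buckets (each line lowercased/rstripped once); objective: faster (constant factor).

-- shared primitive: s.rstrip("\n") — drop every trailing '\n' (exact: Python strips only chars of the argument, from the right)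
def pyRstripNl (s : String) : String := String.ofList ((s.toList.reverse.dropWhile (fun c => c == '\n')).reverse)

-- ===== PORT A =====
-- A's inner 'for i, line in enumerate(lines, 1): … break' loop, state = hits
def aLoop (kw : String) (max_hits : Int) : List String → Int → List (Int × String) → List (Int × String)
  | [], _, hits => hits
  | line :: rest, i, hits =>
    let hits' := if PySem.Str.isIn (PySem.Str.lower kw) (PySem.Str.lower line) then hits ++ [(i, pyRstripNl line)] else hits
    if max_hits ≤ (hits'.length : Int) then hits' else aLoop kw max_hits rest (i + 1) hits'

def find_keyword_contexts (lines : List String) (keywords : List String) (max_hits : Int) : List (String × List (Int × String)) :=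
  (keywords.foldl (fun (results : PySem.Dict String (List (Int × String))) kw =>
      results.insert kw (aLoop kw max_hits lines 1 [])) PySem.Dict.empty).items

-- ===== PORT B =====
-- an entry is (keyword, lowered pattern, hits, active)
abbrev BEntry : Type := String × String × List (Int × String) × Bool

-- 'for kw in keywords: if kw not in seen: …'
def bInitLoop : List String → PySem.Set String → List BEntry → List BEntry
  | [], _, entries => entries
  | kw :: rest, seen, entries =>
    if PySem.Set.contains seen kw then bInitLoop rest seen entries
    else bInitLoop rest (PySem.Set.add seen kw) (entries ++ [(kw, PySem.Str.lower kw, [], true)])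

-- body of 'for e in entries: if e[3]: …'
def bStep (max_hits : Int) (i : Int) (low : String) (text : String) (e : BEntry) : BEntry :=
  if e.2.2.2 then
    let h := if PySem.Str.isIn e.2.1 low then e.2.2.1 ++ [(i, text)] else e.2.2.1
    (e.1, e.2.1, h, !(max_hits ≤ (h.length : Int)))
  else e

-- 'for i, line in enumerate(lines, 1): low = …; text = …; for e in entries: …'
def bLines (max_hits : Int) : List String → Int → List BEntry → List BEntry
  | [], _, entries => entries
  | line :: rest, i, entries =>
    bLines max_hits rest (i + 1) (entries.map (bStep max_hits i (PySem.Str.lower line) (pyRstripNl line)))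

def find_keyword_contexts_alt (lines : List String) (keywords : List String) (max_hits : Int) : List (String × List (Int × String)) :=
  ((bLines max_hits lines 1 (bInitLoop keywords PySem.Set.empty [])).foldl
      (fun (d : PySem.Dict String (List (Int × String))) e => d.insert e.1 e.2.2.1) PySem.Dict.empty).items

-- ===== PRECONDITION & SPEC =====
def Spec_find_keyword_contexts (lines : List String) (keywords : List String) (max_hits : Int) (out : List (String × List (Int × String))) : Prop := out = find_keyword_contexts_alt lines keywords max_hits
instance (lines : List String) (keywords : List String) (max_hits : Int) (out : List (String × List (Int × String))) : Decidable (Spec_find_keyword_contexts lines keywords max_hits out) := by unfold Spec_find_keyword_contexts; infer_instance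

-- ===== CLAIM (what is proved, stated in full; the proofs are below) =====
def Claim_equal_find_keyword_contexts : Prop := ∀ (lines : List String) (keywords : List String) (max_hits : Int), Dom_find_keyword_contexts lines keywords max_hits → Spec_find_keyword_contexts lines keywords max_hits (find_keyword_contexts lines keywords max_hits)

-- ===== LEMMAS AND PROOFS =====

-- per-entry evolution of B's line loop (proof-side view of bLines)
def eEvolve (max_hits : Int) : List String → Int → BEntry → BEntry
  | [], _, e => e
  | line :: rest, i, e => eEvolve max_hits rest (i + 1) (bStep max_hits i (PySem.Str.lower line) (pyRstripNl line) e)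

theorem bLines_eq_map (max_hits : Int) : ∀ (ls : List String) (i : Int) (es : List BEntry),
    bLines max_hits ls i es = es.map (eEvolve max_hits ls i) := by
  intro ls
  induction ls with
  | nil => intro i es; simp [bLines, eEvolve]
  | cons l rest ih =>
      intro i es
      simp only [bLines, eEvolve, ih, List.map_map]
      rfl

theorem eEvolve_inactive (max_hits : Int) : ∀ (ls : List String) (i : Int) (kw pat : String) (hits : List (Int × String)),
    eEvolve max_hits ls i (kw, pat, hits, false) = (kw, pat, hits, false) := by
  intro ls
  induction ls with
  | nil => intro i kw pat hits; rfl
  | cons l rest ih =>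
      intro i kw pat hits
      simp only [eEvolve, bStep]
      exact ih (i + 1) kw pat hits

-- the heart: B's per-entry evolution computes exactly A's per-keyword loop
theorem eEvolve_hits (max_hits : Int) (kw : String) : ∀ (ls : List String) (i : Int) (hits : List (Int × String)),
    (eEvolve max_hits ls i (kw, PySem.Str.lower kw, hits, true)).2.2.1 = aLoop kw max_hits ls i hits := by
  intro ls
  induction ls with
  | nil => intro i hits; rfl
  | cons l rest ih =>
      intro i hits
      simp only [eEvolve, bStep, aLoop]
      by_cases hle : max_hits ≤ ((if PySem.Str.isIn (PySem.Str.lower kw) (PySem.Str.lower l) then hits ++ [(i, pyRstripNl l)] else hits).length : Int)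
      · simp only [hle, if_true, decide_true, Bool.not_true]
        rw [eEvolve_inactive]
      · simp only [hle, if_false, decide_false, Bool.not_false]
        exact ih (i + 1) _

theorem eEvolve_fst (max_hits : Int) : ∀ (ls : List String) (i : Int) (e : BEntry),
    (eEvolve max_hits ls i e).1 = e.1 := by
  intro ls
  induction ls with
  | nil => intro i e; rfl
  | cons l rest ih =>
      intro i e
      simp only [eEvolve, ih]
      simp only [bStep]
      split <;> rfl

-- shape of bInitLoop results
theorem bInitLoop_mem : ∀ (xs : List String) (seen : PySem.Set String) (es : List BEntry) (e : BEntry),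
    e ∈ bInitLoop xs seen es → e ∈ es ∨ ∃ kw, e = (kw, PySem.Str.lower kw, [], true) := by
  intro xs
  induction xs with
  | nil => intro seen es e h; exact Or.inl h
  | cons x rest ih =>
      intro seen es e h
      simp only [bInitLoop] at h
      split at h
      · exact ih _ _ _ h
      · rcases ih _ _ _ h with h' | h'
        · rcases List.mem_append.1 h' with h'' | h''
          · exact Or.inl h''
          · exact Or.inr ⟨x, List.mem_singleton.1 h''⟩
        · exact Or.inr h' 

theorem bInitLoop_nodup : ∀ (xs : List String) (seen : PySem.Set String) (es : List BEntry),
    (es.map (·.1)).Nodup → (∀ k ∈ es.map (·.1), PySem.Set.contains seen k = true) →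
    ((bInitLoop xs seen es).map (·.1)).Nodup := by
  intro xs
  induction xs with
  | nil => intro seen es h _; exact h
  | cons x rest ih =>
      intro seen es hnd hseen
      simp only [bInitLoop]
      split
      · exact ih _ _ hnd hseen
      · rename_i hc
        apply ih
        · simp only [List.map_append, List.map_cons, List.map_nil]
          refine List.Nodup.append hnd (List.nodup_singleton x) ?_
          intro a ha hb
          rw [List.mem_singleton] at hb; subst hb
          have := hseen a ha
          rw [this] at hc; exact absurd rfl hc
        · intro k hk
          simp only [List.map_append, List.map_cons, List.map_nil, List.mem_append, List.mem_singleton] at hk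
          rw [PySem.Set.contains_iff]
          rcases hk with hk | hk
          · exact (PySem.Set.mem_add seen x k).2 (Or.inl ((PySem.Set.contains_iff seen k).1 (hseen k hk)))
          · exact (PySem.Set.mem_add seen x k).2 (Or.inr hk)

-- A's dict fold, tied directly to B's dedup loop
theorem aFold_items (lines : List String) (max_hits : Int) :
    ∀ (xs : List String) (d : PySem.Dict String (List (Int × String))) (seen : PySem.Set String) (es : List BEntry),
    d.items = es.map (fun e => (e.1, aLoop e.1 max_hits lines 1 [])) →
    seen = es.map (·.1) →
    (xs.foldl (fun d kw => d.insert kw (aLoop kw max_hits lines 1 [])) d).items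
      = (bInitLoop xs seen es).map (fun e => (e.1, aLoop e.1 max_hits lines 1 [])) := by
  intro xs
  induction xs with
  | nil => intro d seen es h1 h2; simpa [bInitLoop] using h1
  | cons x rest ih =>
      intro d seen es h1 h2
      have hkeys : d.keys = es.map (·.1) := by
        simp only [PySem.Dict.keys, h1, List.map_map]; rfl
      have hcd : d.contains x = PySem.Set.contains seen x := by
        rw [PySem.Dict.contains_eq_decide_mem_keys, hkeys, h2]
        by_cases hx : x ∈ es.map (·.1)
        · simp [hx]
        · simp only [hx, decide_false]
          by_contra hne
          have : PySem.Set.contains (es.map (·.1)) x = true := by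
            cases hcc : PySem.Set.contains (es.map (·.1)) x
            · exact absurd hcc.symm hne
            · rfl
          exact hx ((PySem.Set.contains_iff _ _).1 this)
      simp only [List.foldl_cons, bInitLoop]
      by_cases hc : PySem.Set.contains seen x = true
      · rw [if_pos hc]
        apply ih _ seen es _ h2
        rw [PySem.Dict.items_insert_of_contains _ _ (by rw [hcd]; exact hc), h1, List.map_map]
        apply List.map_congr_left
        intro e _
        by_cases hx : e.1 = x
        · simp [Function.comp, hx]
        · simp [Function.comp, hx]
      · rw [if_neg hc]
        have hcs : PySem.Set.contains seen x = false := by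
          cases hcc : PySem.Set.contains seen x
          · rfl
          · exact absurd hcc hc
        have hcf : d.contains x = false := by rw [hcd]; exact hcs
        apply ih
        · rw [PySem.Dict.items_insert_of_not_contains _ _ hcf, h1, List.map_append]
          rfl
        · have hadd : seen.add x = seen ++ [x] := by
            simp only [PySem.Set.add, hcs, Bool.false_eq_true, if_false]
          rw [hadd, h2, List.map_append]
          rfl

-- ===== VERDICT (by name: the statement is the Claim_ definition above) =====
theorem find_keyword_contexts_spec : Claim_equal_find_keyword_contexts := by
  intro lines keywords max_hits _
  unfold Spec_find_keyword_contexts find_keyword_contexts find_keyword_contexts_alt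
  have hA := aFold_items lines max_hits keywords PySem.Dict.empty PySem.Set.empty [] rfl rfl
  rw [hA]
  set es0 := bInitLoop keywords PySem.Set.empty [] with hes0
  have hnd0 : ((bLines max_hits lines 1 es0).map (·.1)).Nodup := by
    rw [bLines_eq_map, List.map_map]
    have : (List.map ((·.1) ∘ eEvolve max_hits lines 1) es0) = es0.map (·.1) := by
      apply List.map_congr_left
      intro e _
      exact eEvolve_fst max_hits lines 1 e
    rw [this]
    exact bInitLoop_nodup keywords PySem.Set.empty [] List.nodup_nil (by intro k hk; simp at hk)
  have hfresh : (List.foldl (fun (d : PySem.Dict String (List (Int × String))) e => d.insert e.1 e.2.2.1)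
        PySem.Dict.empty (bLines max_hits lines 1 es0)).items
      = PySem.Dict.empty.items ++ (bLines max_hits lines 1 es0).map (fun e => (e.1, e.2.2.1)) :=
    PySem.Dict.items_foldl_insert_fresh _ _ _ _ (fun a _ => PySem.Dict.contains_empty _) hnd0
  rw [hfresh]
  have hemp : (PySem.Dict.empty : PySem.Dict String (List (Int × String))).items = [] := rfl
  rw [hemp, List.nil_append, bLines_eq_map, List.map_map]
  apply List.map_congr_left
  intro e he
  rcases bInitLoop_mem keywords PySem.Set.empty [] e he with h | ⟨kw, rfl⟩
  · simp at h
  · have h1 := eEvolve_fst max_hits lines 1 (kw, PySem.Str.lower kw, [], true)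
    have h2 := eEvolve_hits max_hits kw lines 1 []
    simp only [Function.comp]
    rw [Prod.ext_iff]
    exact ⟨h1.symm, h2.symm⟩
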